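-- pv_equiv track=rewrite | github.com/AdisonCavani/pp1 | 04-Subroutines/main40.py | f
-- ===== SOURCE A (Python) =====
-- def f(number):
--   sum = 0
--   string = str(number)
--
--   for number in range(0, 9):
--     count = 0
--
--     for letter in string:
--       if number == int(letter):
--         count += 1
--       if number == int(letter) and count > 1:
--         sum += number
--
--     if count > 1:
--       sum += number
--
--   return sum
-- ===== SOURCE B (Python) =====
-- def f(number):
--     # one pass: frequency table of digit values, then an 8-value scan
--     counts = {}
--     for ch in str(number):
--         d = int(ch)
--         counts[d] = counts.get(d, 0) + 1
--     return sum(d * counts.get(d, 0) for d in range(1, 9) if counts.get(d, 0) >= 2)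
-- ===== Notes on version B (the rewrite author's own statement) =====
-- stated objective: idiomatic
-- what changed: A rescans the whole digit string once per candidate digit with a stateful pay-per-repeat inner loop; B builds a frequency table of digit values in a single pass and then sums digit*count over the eight candidate digits whose count reaches two.
import Mathlib
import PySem

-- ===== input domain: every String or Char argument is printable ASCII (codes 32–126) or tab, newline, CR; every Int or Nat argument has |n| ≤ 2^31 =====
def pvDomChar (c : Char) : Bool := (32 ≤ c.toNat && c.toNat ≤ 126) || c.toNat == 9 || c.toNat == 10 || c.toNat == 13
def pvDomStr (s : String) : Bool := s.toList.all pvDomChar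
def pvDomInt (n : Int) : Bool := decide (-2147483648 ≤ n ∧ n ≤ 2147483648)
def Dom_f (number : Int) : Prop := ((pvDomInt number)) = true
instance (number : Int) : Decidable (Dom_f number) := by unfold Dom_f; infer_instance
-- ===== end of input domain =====

-- B replaces A's nine full scans of the digit string by one frequency-table pass plus a scan of the 8 digit values.

-- shared helper: int(letter) for a single character
-- (ofStr? = none is Python's ValueError; those inputs are excluded by Pre_f, so .getD 0 is never reached there)
def pyIntChar (ch : Char) : Int := (PySem.Int.ofStr? (String.mk [ch])).getD 0

-- ===== PORT A =====
def f (number : Int) : Int :=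
  let string := (PySem.Int.toStr number).toList
  (PySem.List.pyRange 0 9 1).foldl (fun sum d =>
    let r := string.foldl (fun (p : Int × Int) letter =>
      let count := if d = pyIntChar letter then p.2 + 1 else p.2
      let sum' := if d = pyIntChar letter ∧ count > 1 then p.1 + d else p.1
      (sum', count)) (sum, 0)
    if r.2 > 1 then r.1 + d else r.1) 0

-- ===== PORT B =====
def f_alt (number : Int) : Int :=
  let counts := (PySem.Int.toStr number).toList.foldl
      (fun (cs : PySem.Dict Int Int) ch =>
        cs.insert (pyIntChar ch) (cs.getD (pyIntChar ch) 0 + 1)) PySem.Dict.empty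
  (PySem.List.pyRange 1 9 1).foldl
      (fun s d => if counts.getD d 0 ≥ 2 then s + d * counts.getD d 0 else s) 0

-- ===== PRECONDITION & SPEC =====
-- Pre_f excludes negative numbers: str(number) then contains '-', on which A's int(letter) raises ValueError (B raises there too).
def Pre_f (number : Int) : Prop := 0 ≤ number
instance (number : Int) : Decidable (Pre_f number) := by unfold Pre_f; infer_instance
def pvWitness_f : Int := 11
def Spec_f (number : Int) (out : Int) : Prop := out = f_alt number
instance (number : Int) (out : Int) : Decidable (Spec_f number out) := by unfold Spec_f; infer_instance

-- ===== CLAIM (what is proved, stated in full; the proofs are below) =====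
def Claim_equal_f : Prop := ∀ (number : Int), Dom_f number → Pre_f number → Spec_f number (f number)

-- ===== LEMMAS AND PROOFS =====

-- number of characters of s whose int() value is d
def cntd (d : Int) (s : List Char) : Nat := s.countP (fun ch => decide (d = pyIntChar ch))

theorem cntd_nil (d : Int) : cntd d [] = 0 := rfl

theorem cntd_cons (d : Int) (ch : Char) (t : List Char) :
    cntd d (ch :: t) = (if d = pyIntChar ch then 1 else 0) + cntd d t := by
  simp only [cntd, List.countP_cons]
  by_cases h : d = pyIntChar ch
  · simp [h]; omega
  · simp [h]

-- A's inner loop invariant: starting from (sum, k), the loop for digit d adds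
-- d once per occurrence after the first seen (all occurrences pay if k ≥ 1)
theorem innerA (d : Int) : ∀ (s : List Char) (sum k : Int), 0 ≤ k →
    s.foldl (fun (p : Int × Int) letter =>
      ((if d = pyIntChar letter ∧ (if d = pyIntChar letter then p.2 + 1 else p.2) > 1 then p.1 + d else p.1),
       (if d = pyIntChar letter then p.2 + 1 else p.2))) (sum, k)
    = (sum + d * (if 1 ≤ k then (cntd d s : Int) else ((cntd d s - 1 : Nat) : Int)),
       k + (cntd d s : Int)) := by
  intro s
  induction s with
  | nil =>
    intro sum k hk
    simp [cntd_nil]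
  | cons ch t ih =>
    intro sum k hk
    simp only [List.foldl_cons]
    by_cases h : d = pyIntChar ch
    · simp only [if_pos h]
      by_cases hk1 : (1:Int) ≤ k
      · rw [if_pos (⟨h, by omega⟩ : d = pyIntChar ch ∧ k + 1 > 1)]
        rw [ih (sum + d) (k + 1) (by omega), cntd_cons d ch t, if_pos h]
        rw [if_pos (by omega : (1:Int) ≤ k + 1), if_pos hk1]
        simp only [Prod.mk.injEq]
        constructor
        · push_cast; ring
        · push_cast; ring
      · rw [if_neg (fun hc => hk1 (by omega : (1:Int) ≤ k))]
        rw [ih sum (k + 1) (by omega), cntd_cons d ch t, if_pos h]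
        rw [if_pos (by omega : (1:Int) ≤ k + 1), if_neg hk1]
        simp only [Prod.mk.injEq]
        constructor
        · have h1 : 1 + cntd d t - 1 = cntd d t := by omega
          rw [h1]
        · push_cast; ring
    · simp only [if_neg h]
      rw [if_neg (fun hc => h hc.1)]
      rw [ih sum k hk, cntd_cons d ch t, if_neg h]
      simp

-- A's whole per-digit pass (inner loop from (sum,0) plus the trailing if) adds exactly B's term
theorem contribA (d sum : Int) (s : List Char) :
    (if (s.foldl (fun (p : Int × Int) letter =>
      ((if d = pyIntChar letter ∧ (if d = pyIntChar letter then p.2 + 1 else p.2) > 1 then p.1 + d else p.1),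
       (if d = pyIntChar letter then p.2 + 1 else p.2))) (sum, 0)).2 > 1
     then (s.foldl (fun (p : Int × Int) letter =>
      ((if d = pyIntChar letter ∧ (if d = pyIntChar letter then p.2 + 1 else p.2) > 1 then p.1 + d else p.1),
       (if d = pyIntChar letter then p.2 + 1 else p.2))) (sum, 0)).1 + d
     else (s.foldl (fun (p : Int × Int) letter =>
      ((if d = pyIntChar letter ∧ (if d = pyIntChar letter then p.2 + 1 else p.2) > 1 then p.1 + d else p.1),
       (if d = pyIntChar letter then p.2 + 1 else p.2))) (sum, 0)).1)
    = sum + (if (2:Int) ≤ (cntd d s : Int) then d * (cntd d s : Int) else 0) := by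
  rw [innerA d s sum 0 le_rfl]
  rw [if_neg (by norm_num : ¬ (1:Int) ≤ 0)]
  by_cases h2 : (2:Int) ≤ (cntd d s : Int)
  · rw [if_pos (by omega : (0:Int) + (cntd d s : Int) > 1), if_pos h2]
    have h1 : ((cntd d s - 1 : Nat) : Int) = (cntd d s : Int) - 1 := by omega
    rw [h1]; ring
  · rw [if_neg (by omega : ¬ ((0:Int) + (cntd d s : Int) > 1)), if_neg h2]
    have h1 : cntd d s - 1 = 0 := by omega
    rw [h1]; simp

-- B's counter lookup is the count
theorem counts_getD (s : List Char) (d : Int) :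
    (s.foldl (fun (cs : PySem.Dict Int Int) ch =>
        cs.insert (pyIntChar ch) (cs.getD (pyIntChar ch) 0 + 1)) PySem.Dict.empty).getD d 0
    = (cntd d s : Int) := by
  have hmap : s.foldl (fun (cs : PySem.Dict Int Int) ch =>
        cs.insert (pyIntChar ch) (cs.getD (pyIntChar ch) 0 + 1)) PySem.Dict.empty
      = (s.map pyIntChar).foldl (fun (cs : PySem.Dict Int Int) x =>
        cs.insert x (cs.getD x 0 + 1)) PySem.Dict.empty := by
    rw [List.foldl_map]
  rw [hmap, PySem.Dict.getD_foldl_insert_add_one]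
  simp only [PySem.Dict.getD_empty, zero_add]
  rw [List.count_eq_countP, List.countP_map]
  unfold cntd
  congr 1
  apply List.countP_congr
  intro ch _
  simp only [Function.comp_apply, beq_iff_eq, decide_eq_true_eq]
  exact eq_comm

-- B's step in additive form
theorem stepB (s d c : Int) : (if c ≥ 2 then s + d * c else s) = s + (if (2:Int) ≤ c then d * c else 0) := by
  split_ifs with h <;> simp

-- ===== VERDICT (by name: the statement is the Claim_ definition above) =====
theorem f_spec : Claim_equal_f := by
  intro number _ _
  unfold Spec_f
  simp only [f, f_alt]
  rw [show PySem.List.pyRange 0 9 1 = [0,1,2,3,4,5,6,7,8] from by decide,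
      show PySem.List.pyRange 1 9 1 = [1,2,3,4,5,6,7,8] from by decide]
  simp only [List.foldl_cons, List.foldl_nil, contribA, counts_getD, stepB]
  norm_num
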